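-- pv_equiv track=rewrite | github.com/schmittydog/algo_expert | non_attacking_queens.py | next_row
-- ===== SOURCE A (Python) =====
-- def next_row(arr):
--     nxt_row = len(arr) * [0]
--     for i in range(len(arr)):
--         if i > 0 and arr[i]&1:
--             nxt_row[i-1] |= 1
--         if i < len(arr) - 1 and arr[i]&4:
--             nxt_row[i+1] |= 4
--         if arr[i]&2:
--             nxt_row[i] |= 2
--     return nxt_row
-- ===== SOURCE B (Python) =====
-- def next_row(arr):
--     # Bitboard approach: pack each attack direction into one integer mask (Horner
--     # over reversed arr), shift whole masks once, then unpack per-cell bits.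
--     n = len(arr)
--     L = V = R = 0
--     for x in reversed(arr):
--         L = (L << 1) | (x & 1)
--         V = (V << 1) | ((x >> 1) & 1)
--         R = (R << 1) | ((x >> 2) & 1)
--     m1 = L >> 1
--     m2 = V
--     m4 = (R << 1) & ((1 << n) - 1)
--     return [((m1 >> j) & 1) | (((m2 >> j) & 1) << 1) | (((m4 >> j) & 1) << 2)
--             for j in range(n)]
-- ===== Notes on version B (the rewrite author's own statement) =====
-- stated objective: alternative
-- what changed: Replaces A's per-cell scatter loop (|=-ing attack bits into a preallocated list) with a bitboard algorithm: each attack direction is packed into a single arbitrary-precision integer mask by a Horner pass over reversed arr, the three whole masks are shifted/truncated once, and the result row is unpacked bit by bit.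
import Mathlib
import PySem

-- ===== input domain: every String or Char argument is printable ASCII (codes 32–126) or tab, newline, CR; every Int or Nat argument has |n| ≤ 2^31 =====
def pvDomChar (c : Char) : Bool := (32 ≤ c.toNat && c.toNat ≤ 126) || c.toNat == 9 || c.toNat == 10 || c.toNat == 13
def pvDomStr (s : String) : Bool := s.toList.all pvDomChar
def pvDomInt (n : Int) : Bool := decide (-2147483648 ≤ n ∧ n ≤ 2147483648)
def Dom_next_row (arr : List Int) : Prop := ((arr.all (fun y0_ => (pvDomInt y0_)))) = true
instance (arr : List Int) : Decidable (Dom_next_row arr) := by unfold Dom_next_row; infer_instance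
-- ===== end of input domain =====

-- B replaces A's per-cell scatter loop with a bitboard encoding: each attack direction is packed
-- into one integer mask (Horner over reversed arr), the whole masks are shifted once, and the
-- result row is unpacked bit by bit; alternative decomposition, return value only.


-- ===== PORT A =====
-- A's loop body; every index it touches is in range, so getD's default is never read
def nrStep (arr : List Int) (row : List Int) (i : Nat) : List Int :=
  let row := if 0 < i ∧ PySem.Int.band (arr.getD i 0) 1 ≠ 0 then
      row.set (i - 1) (PySem.Int.bor (row.getD (i - 1) 0) 1) else row
  let row := if i < arr.length - 1 ∧ PySem.Int.band (arr.getD i 0) 4 ≠ 0 then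
      row.set (i + 1) (PySem.Int.bor (row.getD (i + 1) 0) 4) else row
  if PySem.Int.band (arr.getD i 0) 2 ≠ 0 then
      row.set i (PySem.Int.bor (row.getD i 0) 2) else row

def next_row (arr : List Int) : List Int :=
  (List.range arr.length).foldl (nrStep arr) (List.replicate arr.length 0)

-- ===== PORT B =====
-- Python's `x << k` / `x >> k` are exactly Lean's `<<<` / `>>>` on Int (PySem prelude).
def next_row_alt (arr : List Int) : List Int :=
  let lvr := arr.reverse.foldl (fun (s : Int × Int × Int) (x : Int) =>
      (PySem.Int.bor (s.1 <<< (1 : Nat)) (PySem.Int.band x 1),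
       PySem.Int.bor (s.2.1 <<< (1 : Nat)) (PySem.Int.band (x >>> (1 : Nat)) 1),
       PySem.Int.bor (s.2.2 <<< (1 : Nat)) (PySem.Int.band (x >>> (2 : Nat)) 1))) (0, 0, 0)
  let m1 := lvr.1 >>> (1 : Nat)
  let m2 := lvr.2.1
  let m4 := PySem.Int.band (lvr.2.2 <<< (1 : Nat)) ((1 <<< arr.length) - 1)
  (List.range arr.length).map (fun (j : Nat) =>
    PySem.Int.bor (PySem.Int.bor
      (PySem.Int.band (m1 >>> j) 1)
      ((PySem.Int.band (m2 >>> j) 1) <<< (1 : Nat)))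
      ((PySem.Int.band (m4 >>> j) 1) <<< (2 : Nat)))

-- ===== PRECONDITION & SPEC =====
def Spec_next_row (arr : List Int) (out : List Int) : Prop := out = next_row_alt arr
instance (arr : List Int) (out : List Int) : Decidable (Spec_next_row arr out) := by unfold Spec_next_row; infer_instance

-- ===== CLAIM (what is proved, stated in full; the proofs are below) =====
def Claim_equal_next_row : Prop := ∀ (arr : List Int), Dom_next_row arr → Spec_next_row arr (next_row arr)

-- ===== LEMMAS AND PROOFS =====

-- the common "gather" value of cell j of the next row
def gatherNR (arr : List Int) (j : Nat) : Int :=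
  PySem.Int.bor (PySem.Int.bor
    (if PySem.Int.band (arr.getD j 0) 2 ≠ 0 then 2 else 0)
    (if j + 1 < arr.length ∧ PySem.Int.band (arr.getD (j + 1) 0) 1 ≠ 0 then 1 else 0))
    (if 0 < j ∧ PySem.Int.band (arr.getD (j - 1) 0) 4 ≠ 0 then 4 else 0)

-- ========== A-side: next_row arr = map (gatherNR arr) (range n) ==========

-- cell value at j after bit-1 scatters of iterations < k1, bit-2 of < k2, bit-4 of < k4+? (b4 uses j ≤ k4)
def nrV (arr : List Int) (k1 k2 k4 j : Nat) : Int :=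
  (if 0 < j then if j ≤ k4 then if PySem.Int.band (arr.getD (j - 1) 0) 4 ≠ 0 then 4 else 0 else 0 else 0)
  + (if j < k2 then if PySem.Int.band (arr.getD j 0) 2 ≠ 0 then 2 else 0 else 0)
  + (if j + 1 < k1 then if PySem.Int.band (arr.getD (j + 1) 0) 1 ≠ 0 then 1 else 0 else 0)

lemma mapRange_getElem? (f : Nat → Int) (n m : Nat) :
    ((List.range n).map f)[m]? = if m < n then some (f m) else none := by
  by_cases h : m < n <;> simp [h]

lemma set_map_range (f : Nat → Int) (n i : Nat) (v : Int) :
    ((List.range n).map f).set i v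
      = (List.range n).map (fun j => if j = i then v else f j) := by
  apply List.ext_getElem?
  intro m
  simp only [List.getElem?_set, List.length_map, List.length_range, mapRange_getElem?]
  split_ifs <;> simp_all

lemma getD_map_range (f : Nat → Int) (n i : Nat) (hi : i < n) :
    ((List.range n).map f).getD i 0 = f i := by
  simp [List.getD_eq_getElem?_getD, hi]

-- first conditional of A's loop body (bit-1 scatter to i-1)
lemma nrU1 (arr : List Int) (k k2 k4 : Nat) (hk : k < arr.length) :
    (if 0 < k ∧ PySem.Int.band (arr.getD k 0) 1 ≠ 0 then
        ((List.range arr.length).map (nrV arr k k2 k4)).set (k - 1)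
          (PySem.Int.bor (((List.range arr.length).map (nrV arr k k2 k4)).getD (k - 1) 0) 1)
      else (List.range arr.length).map (nrV arr k k2 k4))
    = (List.range arr.length).map (nrV arr (k + 1) k2 k4) := by
  split_ifs with h
  · obtain ⟨h0, hb⟩ := h
    rw [set_map_range, getD_map_range _ _ _ (by omega)]
    apply List.map_congr_left
    intro j hj
    have hjn : j < arr.length := List.mem_range.mp hj
    by_cases e : j = k - 1
    · subst e
      have e1 : k - 1 + 1 = k := by omega
      simp only [if_pos rfl, nrV, e1]
      split_ifs <;> first | rfl | decide | omega | contradiction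
    · rw [if_neg e]
      simp only [nrV]
      split_ifs <;> first | rfl | decide | omega | contradiction
  · apply List.map_congr_left
    intro j hj
    by_cases e : j + 1 = k
    · rw [← e] at h
      have hb : PySem.Int.band (arr.getD (j + 1) 0) 1 = 0 := by
        by_contra hb; exact h ⟨by omega, hb⟩
      simp only [nrV]
      split_ifs <;> first | rfl | decide | omega | contradiction
    · simp only [nrV]
      split_ifs <;> first | rfl | decide | omega | contradiction

-- second conditional (bit-4 scatter to i+1)
lemma nrU2 (arr : List Int) (k1 k2 k : Nat) (hk : k < arr.length) :
    (if k < arr.length - 1 ∧ PySem.Int.band (arr.getD k 0) 4 ≠ 0 then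
        ((List.range arr.length).map (nrV arr k1 k2 k)).set (k + 1)
          (PySem.Int.bor (((List.range arr.length).map (nrV arr k1 k2 k)).getD (k + 1) 0) 4)
      else (List.range arr.length).map (nrV arr k1 k2 k))
    = (List.range arr.length).map (nrV arr k1 k2 (k + 1)) := by
  split_ifs with h
  · obtain ⟨h0, hb⟩ := h
    rw [set_map_range, getD_map_range _ _ _ (by omega)]
    apply List.map_congr_left
    intro j hj
    have hjn : j < arr.length := List.mem_range.mp hj
    by_cases e : j = k + 1
    · subst e
      have e1 : k + 1 - 1 = k := by omega
      simp only [if_pos rfl, nrV, e1]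
      split_ifs <;> first | rfl | decide | omega | contradiction
    · rw [if_neg e]
      simp only [nrV]
      split_ifs <;> first | rfl | decide | omega | contradiction
  · apply List.map_congr_left
    intro j hj
    have hjn : j < arr.length := List.mem_range.mp hj
    by_cases e : j = k + 1
    · subst e
      have e1 : k + 1 - 1 = k := by omega
      have hb : PySem.Int.band (arr.getD k 0) 4 = 0 ∨ ¬ k < arr.length - 1 := by
        by_cases hb' : PySem.Int.band (arr.getD k 0) 4 = 0
        · exact Or.inl hb'
        · exact Or.inr (fun hlt => h ⟨hlt, hb'⟩)
      rcases hb with hb | hb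
      · simp only [nrV, e1]
        split_ifs <;> first | rfl | decide | omega | contradiction
      · omega
    · simp only [nrV]
      split_ifs <;> first | rfl | decide | omega | contradiction

-- third conditional (bit-2 to i)
lemma nrU3 (arr : List Int) (k1 k k4 : Nat) (hk : k < arr.length) :
    (if PySem.Int.band (arr.getD k 0) 2 ≠ 0 then
        ((List.range arr.length).map (nrV arr k1 k k4)).set k
          (PySem.Int.bor (((List.range arr.length).map (nrV arr k1 k k4)).getD k 0) 2)
      else (List.range arr.length).map (nrV arr k1 k k4))
    = (List.range arr.length).map (nrV arr k1 (k + 1) k4) := by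
  split_ifs with h
  · rw [set_map_range, getD_map_range _ _ _ hk]
    apply List.map_congr_left
    intro j hj
    have hjn : j < arr.length := List.mem_range.mp hj
    by_cases e : j = k
    · subst e
      simp only [if_pos rfl, nrV]
      split_ifs <;> first | rfl | decide | omega | contradiction
    · rw [if_neg e]
      simp only [nrV]
      split_ifs <;> first | rfl | decide | omega | contradiction
  · apply List.map_congr_left
    intro j hj
    by_cases e : j = k
    · subst e
      simp only [nrV]
      split_ifs <;> first | rfl | decide | omega | contradiction
    · simp only [nrV]
      split_ifs <;> first | rfl | decide | omega | contradiction

lemma nrStep_eq (arr : List Int) (k : Nat) (hk : k < arr.length) :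
    nrStep arr ((List.range arr.length).map (nrV arr k k k)) k
      = (List.range arr.length).map (nrV arr (k + 1) (k + 1) (k + 1)) := by
  unfold nrStep
  simp only []
  rw [nrU1 arr k k k hk, nrU2 arr (k + 1) k k hk, nrU3 arr (k + 1) k (k + 1) hk]

lemma nr_inv (arr : List Int) : ∀ k, k ≤ arr.length →
    (List.range k).foldl (nrStep arr) (List.replicate arr.length 0)
      = (List.range arr.length).map (nrV arr k k k) := by
  intro k
  induction k with
  | zero =>
      intro _
      have h0 : ∀ j, nrV arr 0 0 0 j = 0 := by
        intro j; unfold nrV; split_ifs <;> omega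
      simp only [List.range_zero, List.foldl_nil]
      rw [show (List.range arr.length).map (nrV arr 0 0 0)
            = (List.range arr.length).map (fun _ => (0 : Int)) from
          List.map_congr_left (fun j _ => h0 j)]
      simp [List.map_const']
  | succ k ih =>
      intro hk
      rw [List.range_succ, List.foldl_append, List.foldl_cons, List.foldl_nil,
        ih (by omega), nrStep_eq arr k (by omega)]

lemma nrV_final (arr : List Int) (j : Nat) (hj : j < arr.length) :
    nrV arr arr.length arr.length arr.length j = gatherNR arr j := by
  unfold nrV gatherNR
  split_ifs <;> first | rfl | decide | omega

lemma nextRow_eq_gather (arr : List Int) :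
    next_row arr = (List.range arr.length).map (gatherNR arr) := by
  unfold next_row
  rw [nr_inv arr arr.length le_rfl]
  exact List.map_congr_left (fun j hj => nrV_final arr j (List.mem_range.mp hj))

-- ========== B-side: next_row_alt arr = map (gatherNR arr) (range n) ==========

-- low bit of x >> k, as a Nat in {0,1}
def hbit (x : Int) (k : Nat) : Nat := (PySem.Int.band (x >>> k) 1).toNat
def hmask (k : Nat) : List Int → Nat
  | [] => 0
  | x :: xs => 2 * hmask k xs + hbit x k
lemma band_one_cases (y : Int) : PySem.Int.band y 1 = 0 ∨ PySem.Int.band y 1 = 1 := by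
  rw [PySem.Int.band_one]
  have h1 := PySem.Int.mod_nonneg y (b := 2) (by norm_num)
  have h2 := PySem.Int.mod_lt y (b := 2) (by norm_num)
  omega
lemma hbit_le (x : Int) (k : Nat) : hbit x k ≤ 1 := by
  unfold hbit
  rcases band_one_cases (x >>> k) with h | h <;> rw [h] <;> decide
lemma band_eq_hbit (x : Int) (k : Nat) : PySem.Int.band (x >>> k) 1 = (hbit x k : Int) := by
  unfold hbit
  rcases band_one_cases (x >>> k) with h | h <;> rw [h] <;> decide

lemma two_mul_lor_bit (m b : Nat) (hb : b ≤ 1) : (m * 2) ||| b = 2 * m + b := by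
  interval_cases b
  · simp [Nat.mul_comm]
  · apply Nat.eq_of_testBit_eq
    intro j
    cases j with
    | zero =>
        rw [Nat.testBit_lor, Nat.testBit_zero, Nat.testBit_zero, Nat.testBit_zero]
        simp
    | succ j =>
        rw [Nat.testBit_lor, Nat.testBit_succ, Nat.testBit_succ, Nat.testBit_succ,
          show m * 2 / 2 = m by omega, show (2 * m + 1) / 2 = m by omega,
          show (1 : Nat) / 2 = 0 by norm_num, Nat.zero_testBit, Bool.or_false]

lemma bor_horner (m : Nat) (x : Int) (k : Nat) :
    PySem.Int.bor ((m : Int) <<< (1 : Nat)) (PySem.Int.band (x >>> k) 1)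
      = ((2 * m + hbit x k : Nat) : Int) := by
  rw [band_eq_hbit,
    show ((m : Int) <<< (1 : Nat)) = ((m <<< 1 : Nat) : Int) by exact_mod_cast rfl,
    PySem.Int.bor_natCast, Nat.shiftLeft_eq, pow_one, two_mul_lor_bit m _ (hbit_le x k)]

lemma hbit_zero (k : Nat) : hbit 0 k = 0 := by
  unfold hbit
  rw [show ((0 : Int) >>> k) = ((0 >>> k : Nat) : Int) from rfl, Nat.zero_shiftRight]
  decide

lemma testBit_hmask (k : Nat) (xs : List Int) (j : Nat) :
    Nat.testBit (hmask k xs) j = (hbit (xs.getD j 0) k == 1) := by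
  induction xs generalizing j with
  | nil => simp [hmask, Nat.zero_testBit, List.getD, hbit_zero]
  | cons x xs ih =>
      cases j with
      | zero =>
          show Nat.testBit (2 * hmask k xs + hbit x k) 0 = (hbit x k == 1)
          have hb := hbit_le x k
          rw [Nat.testBit_zero]
          interval_cases h : hbit x k <;> simp [Nat.mul_add_mod] <;> omega
      | succ j =>
          show Nat.testBit (2 * hmask k xs + hbit x k) (j + 1) = _
          have hb := hbit_le x k
          rw [Nat.testBit_succ,
            show (2 * hmask k xs + hbit x k) / 2 = hmask k xs by omega]
          exact ih j

lemma shiftRight_zero_int (x : Int) : x >>> (0 : Nat) = x := by cases x <;> rfl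

lemma bor_horner0 (m : Nat) (x : Int) :
    PySem.Int.bor ((m : Int) <<< (1 : Nat)) (PySem.Int.band x 1)
      = ((2 * m + hbit x 0 : Nat) : Int) := by
  have h := bor_horner m x 0
  rwa [shiftRight_zero_int] at h

-- bit k of x, read two ways
lemma shiftr_mod (n k : Nat) : (n >>> k) % 2 = (Nat.testBit n k).toNat := by
  rw [Nat.testBit, Nat.and_comm, Nat.and_one_is_mod]
  rcases Nat.mod_two_eq_zero_or_one (n >>> k) with h | h <;> rw [h] <;> rfl

lemma hbit_iff_band (x : Int) (k : Nat) :
    (hbit x k == 1) = decide (PySem.Int.band x ((2 : Int) ^ k) ≠ 0) := by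
  have h2k : ((2 : Int) ^ k) = ((2 ^ k : Nat) : Int) := by push_cast; ring
  have hpos : 0 < 2 ^ k := Nat.two_pow_pos k
  cases x with
  | ofNat n =>
      unfold hbit
      rw [show ((Int.ofNat n) >>> k) = Int.ofNat (n >>> k) from rfl, h2k]
      rw [show (Int.ofNat (n >>> k)) = ((n >>> k : Nat) : Int) from rfl,
        show (Int.ofNat n) = ((n : Nat) : Int) from rfl,
        show (1 : Int) = ((1 : Nat) : Int) from rfl,
        PySem.Int.band_natCast, PySem.Int.band_natCast,
        Nat.and_one_is_mod, shiftr_mod, Nat.and_two_pow]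
      cases h : Nat.testBit n k <;> simp [h] <;> omega
  | negSucc n =>
      unfold hbit
      rw [show ((Int.negSucc n) >>> k) = Int.negSucc (n >>> k) from rfl, h2k]
      have hb1 : ∀ m : Nat, PySem.Int.band (Int.negSucc m) 1
          = ((1 - (1 &&& m) : Nat) : Int) := by
        intro m
        rw [PySem.Int.band, if_neg (by exact Int.not_le.mpr (Int.negSucc_lt_zero _)),
          if_pos (by norm_num)]
        rw [show (-(Int.negSucc m) - 1) = (m : Int) by simp [Int.negSucc_eq]]
        simp
      have hb2 : PySem.Int.band (Int.negSucc n) ((2 ^ k : Nat) : Int)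
          = (((2 ^ k) - (n &&& (2 ^ k)) : Nat) : Int) := by
        rw [PySem.Int.band, if_neg (by exact Int.not_le.mpr (Int.negSucc_lt_zero _)),
          if_pos (by positivity)]
        rw [show (-(Int.negSucc n) - 1) = (n : Int) by simp [Int.negSucc_eq]]
        have h2t : ((2 : Int) ^ k).toNat = 2 ^ k := by
          rw [h2k]; exact Int.toNat_natCast _
        simp [Nat.and_comm, h2t]
      rw [hb1, hb2, Nat.and_comm 1, Nat.and_one_is_mod, shiftr_mod, Nat.and_two_pow]
      cases h : Nat.testBit n k <;> simp [h] <;> omega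

-- the reversed-foldl computes the three Horner masks
lemma fold_masks (arr : List Int) :
    arr.reverse.foldl (fun (s : Int × Int × Int) (x : Int) =>
      (PySem.Int.bor (s.1 <<< (1 : Nat)) (PySem.Int.band x 1),
       PySem.Int.bor (s.2.1 <<< (1 : Nat)) (PySem.Int.band (x >>> (1 : Nat)) 1),
       PySem.Int.bor (s.2.2 <<< (1 : Nat)) (PySem.Int.band (x >>> (2 : Nat)) 1))) (0, 0, 0)
    = ((hmask 0 arr : Int), (hmask 1 arr : Int), (hmask 2 arr : Int)) := by
  rw [List.foldl_reverse]
  induction arr with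
  | nil => rfl
  | cons x xs ih =>
      rw [List.foldr_cons, ih]
      show (PySem.Int.bor (((hmask 0 xs : Nat) : Int) <<< (1 : Nat)) (PySem.Int.band x 1),
            PySem.Int.bor (((hmask 1 xs : Nat) : Int) <<< (1 : Nat)) (PySem.Int.band (x >>> (1 : Nat)) 1),
            PySem.Int.bor (((hmask 2 xs : Nat) : Int) <<< (1 : Nat)) (PySem.Int.band (x >>> (2 : Nat)) 1))
          = (((hmask 0 (x :: xs) : Nat) : Int), ((hmask 1 (x :: xs) : Nat) : Int), ((hmask 2 (x :: xs) : Nat) : Int))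
      rw [bor_horner0, bor_horner, bor_horner]
      rfl

-- extracting bit j of a Nat-valued mask with Python's  (m >> j) & 1
lemma band_shiftRight_one_nat (M : Nat) (j : Nat) :
    PySem.Int.band ((M : Int) >>> j) 1 = if Nat.testBit M j then 1 else 0 := by
  rw [show ((M : Int) >>> j) = ((M >>> j : Nat) : Int) by exact_mod_cast rfl,
    show (1 : Int) = ((1 : Nat) : Int) from rfl, PySem.Int.band_natCast,
    Nat.and_one_is_mod, shiftr_mod]
  cases h : Nat.testBit M j <;> simp [h]

-- ===== VERDICT (by name: the statement is the Claim_ definition above) =====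
theorem next_row_spec : Claim_equal_next_row := by
  intro arr _
  unfold Spec_next_row
  rw [nextRow_eq_gather]
  simp only [next_row_alt, fold_masks]
  apply List.map_congr_left
  intro j hj
  have hjn : j < arr.length := List.mem_range.mp hj
  -- the three extracted bits
  have e1 : PySem.Int.band ((((hmask 0 arr : Nat) : Int) >>> (1 : Nat)) >>> j) 1
      = if j + 1 < arr.length ∧ PySem.Int.band (arr.getD (j + 1) 0) 1 ≠ 0 then 1 else 0 := by
    rw [show (((hmask 0 arr : Nat) : Int) >>> (1 : Nat)) = (((hmask 0 arr) >>> 1 : Nat) : Int)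
        by exact_mod_cast rfl, band_shiftRight_one_nat]
    rw [Nat.testBit_shiftRight, show 1 + j = j + 1 by omega, testBit_hmask, hbit_iff_band]
    by_cases hlt : j + 1 < arr.length
    · rw [show arr.getD (j+1) 0 = arr.getD (j+1) 0 from rfl]
      rw [show ((2:Int)^(0:Nat)) = 1 by norm_num] at *
      by_cases hb : PySem.Int.band (arr.getD (j + 1) 0) ((2:Int)^(0:Nat)) ≠ 0 <;>
        simp only [pow_zero] at hb <;> simp [hb, hlt]
    · have hg : arr.getD (j + 1) 0 = 0 := by
        rw [List.getD_eq_getElem?_getD]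
        simp [List.getElem?_eq_none (by omega : arr.length ≤ j + 1)]
      simp [hg, hlt]
      decide
  have e2 : PySem.Int.band (((hmask 1 arr : Nat) : Int) >>> j) 1
      = if PySem.Int.band (arr.getD j 0) 2 ≠ 0 then 1 else 0 := by
    rw [band_shiftRight_one_nat, testBit_hmask, hbit_iff_band]
    by_cases hb : PySem.Int.band (arr.getD j 0) ((2:Int)^(1:Nat)) ≠ 0 <;>
      simp only [pow_one] at hb <;> simp [hb]
  have e4 : PySem.Int.band ((PySem.Int.band (((hmask 2 arr : Nat) : Int) <<< (1 : Nat))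
        ((1 <<< arr.length) - 1)) >>> j) 1
      = if 0 < j ∧ PySem.Int.band (arr.getD (j - 1) 0) 4 ≠ 0 then 1 else 0 := by
    have hone : (1 : Nat) ≤ 1 <<< arr.length := by
      rw [Nat.shiftLeft_eq, Nat.one_mul]; exact Nat.one_le_two_pow
    have hcast : PySem.Int.band (((hmask 2 arr : Nat) : Int) <<< (1 : Nat))
        ((1 <<< arr.length) - 1)
        = (((hmask 2 arr <<< 1) &&& ((1 <<< arr.length) - 1) : Nat) : Int) := by
      rw [show (((hmask 2 arr : Nat) : Int) <<< (1 : Nat)) = ((hmask 2 arr <<< 1 : Nat) : Int)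
          by exact_mod_cast rfl,
        ← Nat.cast_one (R := Int), ← Nat.cast_sub hone,
        PySem.Int.band_natCast]
    rw [hcast, band_shiftRight_one_nat, show ((1 <<< arr.length) - 1 : Nat) = 2 ^ arr.length - 1
        by rw [Nat.shiftLeft_eq, Nat.one_mul],
      Nat.testBit_and, Nat.testBit_two_pow_sub_one, Nat.shiftLeft_eq]
    cases j with
    | zero =>
        rw [show Nat.testBit (hmask 2 arr * 2 ^ 1) 0 = false by
          rw [Nat.testBit_zero]; simp [Nat.mul_comm, Nat.mul_mod_right]]
        simp
    | succ j =>
        rw [Nat.testBit_succ, show hmask 2 arr * 2 ^ 1 / 2 = hmask 2 arr by omega,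
          testBit_hmask, hbit_iff_band]
        have hlt : j + 1 < arr.length := hjn
        by_cases hb : PySem.Int.band (arr.getD j 0) ((2:Int)^(2:Nat)) ≠ 0 <;>
          simp only [show ((2:Int)^(2:Nat)) = 4 by norm_num] at hb <;>
          simp [hb, hlt, Nat.succ_sub_one]
  rw [e1, e2, e4]
  unfold gatherNR
  split_ifs <;> decide
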